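-- pv_equiv track=rewrite | github.com/JeromeMarechal/Assignment | firstLetterToAppear.py | repeatedCharacter
-- ===== SOURCE A (Python) =====
-- def repeatedCharacter( s: str) -> str:
--     char = {}
--
--     for i in range(len(s)):
--         if s[i] in char.keys() and char[s[i]][1] != 2:
--             char[s[i]][0] = i - char[s[i]][0]
--             char[s[i]][1] += 1
--         elif s[i] not in char.keys():
--             char[s[i]] = [i, 1]
--
--     char = {pairs: values[0] for pairs, values in char.items() if values[1] == 2}
--
--     if char:
--         min_distance = min(char.values())
--     else:
--         return None
--
--     for char, distance in char.items():
--         if distance == min_distance: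
--             return char
-- ===== SOURCE B (Python) =====
-- def repeatedCharacter(s: str) -> str:
--     # One streaming pass: track each char's first index; on its second
--     # occurrence record the gap and keep the running strict minimum.
--     first = {}
--     counted = set()
--     best_char = None
--     best_dist = None
--     for i, c in enumerate(s):
--         if c in first:
--             if c not in counted:
--                 counted.add(c)
--                 d = i - first[c]
--                 if best_dist is None or d < best_dist:
--                     best_char, best_dist = c, d
--         else:
--             first[c] = i
--     return best_char
-- ===== Notes on version B (the rewrite author's own statement) =====
-- stated objective: faster
-- what changed: Replaces A's build-dict-of-[value,count]-pairs followed by a dict-comprehension filter, a min() pass and a final scan with a single streaming pass that keeps each char's first index, a set of chars already counted twice, and the running strict-minimum (char, gap) candidate.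
import Mathlib
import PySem

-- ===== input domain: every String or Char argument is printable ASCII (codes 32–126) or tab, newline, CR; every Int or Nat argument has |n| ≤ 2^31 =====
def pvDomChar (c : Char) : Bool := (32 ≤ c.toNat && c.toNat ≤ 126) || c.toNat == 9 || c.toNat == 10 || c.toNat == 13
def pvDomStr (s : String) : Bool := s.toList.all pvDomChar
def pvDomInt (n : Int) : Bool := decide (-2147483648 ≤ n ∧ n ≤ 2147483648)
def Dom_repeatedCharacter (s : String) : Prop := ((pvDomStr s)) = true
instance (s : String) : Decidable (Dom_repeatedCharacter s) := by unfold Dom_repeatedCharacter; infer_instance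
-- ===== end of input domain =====

-- B replaces A's dict-of-[value,count] build followed by filter/min/second-scan passes with one
-- streaming pass keeping the running minimum candidate (measured faster by a constant factor).

-- ===== PORT A =====
-- one loop iteration of A: dict maps char -> (stored value, count)
def stepA (d : PySem.Dict Char (Int × Int)) (q : Int × Char) : PySem.Dict Char (Int × Int) :=
  match d.get? q.2 with
  | some v => if v.2 ≠ 2 then d.insert q.2 (q.1 - v.1, v.2 + 1) else d
  | none => d.insert q.2 (q.1, 1)

def repeatedCharacter (s : String) : Option String :=
  let d := (PySem.List.enumerate s.toList 0).foldl stepA (PySem.Dict.mk [])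
  -- {pairs: values[0] for pairs, values in char.items() if values[1] == 2}
  let d2 : PySem.Dict Char Int :=
    PySem.Dict.mk ((d.items.filter (fun q => q.2.2 == 2)).map (fun q => (q.1, q.2.1)))
  match PySem.List.min? d2.values (fun v => v) with
  | none => none     -- empty dict: return None
  | some m => (d2.items.find? (fun q => q.2 == m)).map (fun q => String.singleton q.1)

-- ===== PORT B =====
-- one streaming step of B: state = (first-index dict, counted set, best (char, gap))
def stepB (st : PySem.Dict Char Int × PySem.Set Char × Option (Char × Int)) (q : Int × Char) :
    PySem.Dict Char Int × PySem.Set Char × Option (Char × Int) :=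
  match st.1.get? q.2 with
  | some f =>
      if st.2.1.contains q.2 then st
      else
        (st.1, st.2.1.add q.2,
          match st.2.2 with
          | none => some (q.2, q.1 - f)
          | some bm => if q.1 - f < bm.2 then some (q.2, q.1 - f) else some bm)
  | none => (st.1.insert q.2 q.1, st.2.1, st.2.2)

def repeatedCharacter_alt (s : String) : Option String :=
  let st := (PySem.List.enumerate s.toList 0).foldl stepB
      ((PySem.Dict.mk [] : PySem.Dict Char Int), (PySem.Set.empty : PySem.Set Char),
        (none : Option (Char × Int)))
  st.2.2.map (fun q => String.singleton q.1)

-- ===== PRECONDITION & SPEC =====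
def Spec_repeatedCharacter (s : String) (out : Option String) : Prop := out = repeatedCharacter_alt s
instance (s : String) (out : Option String) : Decidable (Spec_repeatedCharacter s out) := by unfold Spec_repeatedCharacter; infer_instance

-- ===== CLAIM (what is proved, stated in full; the proofs are below) =====
def Claim_equal_repeatedCharacter : Prop := ∀ (s : String), Dom_repeatedCharacter s → Spec_repeatedCharacter s (repeatedCharacter s)

-- ===== LEMMAS AND PROOFS =====
def occs (p : List Char) (a : Char) : List Nat :=
  (p.zipIdx.filter (fun q => q.1 == a)).map (·.2)

lemma occs_append (p : List Char) (c a : Char) :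
    occs (p ++ [c]) a = occs p a ++ (if a = c then [p.length] else []) := by
  simp only [occs, List.zipIdx_append, List.filter_append, List.map_append, List.zipIdx]
  congr 1
  by_cases h : a = c <;> simp [h, beq_iff_eq]
  exact fun hh => (h hh.symm).elim

lemma length_occs (p : List Char) (a : Char) : (occs p a).length = p.count a := by
  induction p using List.reverseRecOn with
  | nil => rfl
  | append_singleton p c ih =>
    rw [occs_append]
    by_cases h : a = c
    · subst h; simp [List.count_append, ih, beq_iff_eq]
    · simp [List.count_append, ih, h, beq_iff_eq]
      rw [List.count_eq_zero]; simp [h]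

lemma mem_occs_lt (p : List Char) (a : Char) {i : Nat} (h : i ∈ occs p a) : i < p.length := by
  simp only [occs, List.mem_map, List.mem_filter] at h
  obtain ⟨x, ⟨hx, _⟩, h2⟩ := h
  obtain ⟨y, j⟩ := x
  have := List.mem_zipIdx hx
  simp at h2
  omega

lemma occs_ne_nil_of_mem (p : List Char) (a : Char) (h : a ∈ p) : occs p a ≠ [] := by
  have h1 := length_occs p a
  have h2 := List.count_pos_iff.mpr h
  intro hn; rw [hn] at h1; simp at h1; omega

lemma find?_map_pair_none {β : Type} (S : List Char) (v : Char → β) (c : Char) (hc : c ∉ S) :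
    (S.map (fun a => (a, v a))).find? (fun q => q.1 == c) = none := by
  rw [List.find?_eq_none]
  simp only [List.mem_map]
  rintro x ⟨a, ha, rfl⟩
  simp only [beq_iff_eq]
  exact fun h => hc (h ▸ ha)

lemma find?_map_pair {β : Type} (S : List Char) (v : Char → β) (c : Char) (hc : c ∈ S) :
    (S.map (fun a => (a, v a))).find? (fun q => q.1 == c) = some (c, v c) := by
  induction S with
  | nil => cases hc
  | cons b S ih =>
    by_cases hb : b = c
    · subst hb; simp [List.find?_cons]
    · rw [List.mem_cons] at hc
      rcases hc with h | h
      · exact absurd h.symm hb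
      · simpa [List.find?_cons, hb] using ih h

lemma ofList_append_mem (p : List Char) (c : Char) (hc : c ∈ p) :
    PySem.Set.ofList (p ++ [c]) = PySem.Set.ofList p := by
  rw [PySem.Set.ofList_eq_foldl, List.foldl_append, ← PySem.Set.ofList_eq_foldl]
  show PySem.Set.add _ c = _
  rw [PySem.Set.add]
  have : (PySem.Set.ofList p).contains c = true := by
    rw [PySem.Set.contains, List.contains_iff_mem, PySem.Set.mem_ofList]
    exact hc
  simp [this]
  exact hc

lemma ofList_append_not_mem (p : List Char) (c : Char) (hc : c ∉ p) :
    PySem.Set.ofList (p ++ [c]) = PySem.Set.ofList p ++ [c] := by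
  rw [PySem.Set.ofList_eq_foldl, List.foldl_append, ← PySem.Set.ofList_eq_foldl]
  show PySem.Set.add _ c = _
  rw [PySem.Set.add]
  have : (PySem.Set.ofList p).contains c = false := by
    rw [PySem.Set.contains]
    rw [Bool.eq_false_iff]
    intro h
    rw [List.contains_iff_mem, PySem.Set.mem_ofList] at h
    exact hc h
  simp [this]
  exact hc

lemma min?_int_spec (v : Int) (vs : List Int) :
    ∃ m, PySem.List.min? (v :: vs) (fun x => x) = some m ∧ m ∈ v :: vs ∧ ∀ x ∈ v :: vs, m ≤ x := by
  simp only [PySem.List.min?, List.foldl_cons]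
  induction vs generalizing v with
  | nil => exact ⟨v, rfl, by simp, by simp⟩
  | cons w ws ih =>
    simp only [List.foldl_cons]
    by_cases h : w < v
    · obtain ⟨m, h1, h2, h3⟩ := ih w
      refine ⟨m, by simpa [h] using h1, ?_, ?_⟩
      · rcases List.mem_cons.mp h2 with rfl | h2 <;> simp [h2]
      · intro x hx
        rcases List.mem_cons.mp hx with rfl | hx
        · have := h3 w (by simp); omega
        · exact h3 x hx
    · obtain ⟨m, h1, h2, h3⟩ := ih v
      refine ⟨m, by simpa [h] using h1, ?_, ?_⟩
      · rcases List.mem_cons.mp h2 with rfl | h2 <;> simp [h2]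
      · intro x hx
        rcases List.mem_cons.mp hx with rfl | hx
        · exact h3 x (by simp)
        · rcases List.mem_cons.mp hx with rfl | hx
          · have := h3 v (by simp); omega
          · exact h3 x (by simp [hx])

def pa (L : List (Char × Int)) : Option (Char × Int) :=
  match PySem.List.min? (L.map (·.2)) (fun v => v) with
  | none => none
  | some m => L.find? (fun q => q.2 == m)

lemma min?_int_spec' (L : List Int) (h : L ≠ []) :
    ∃ m, PySem.List.min? L (fun x => x) = some m ∧ m ∈ L ∧ ∀ x ∈ L, m ≤ x := by
  cases L with
  | nil => exact absurd rfl h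
  | cons v vs => exact min?_int_spec v vs

lemma pa_insert (L₁ L₂ : List (Char × Int)) (c : Char) (d : Int)
    (h₂ : ∀ q ∈ L₂, q.2 < d) :
    pa (L₁ ++ (c, d) :: L₂)
      = match pa (L₁ ++ L₂) with
        | none => some (c, d)
        | some bm => if d < bm.2 then some (c, d) else some bm := by
  by_cases hL : L₁ ++ L₂ = []
  · obtain ⟨h1, h2'⟩ := List.append_eq_nil_iff.mp hL
    subst h1; subst h2'
    simp [pa, PySem.List.min?]
  -- the old list is nonempty: get its min m and first minimal pair b
  obtain ⟨m, hm, hmem, hle⟩ := min?_int_spec' ((L₁ ++ L₂).map (·.2)) (by simpa using hL)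
  have hfind : ∃ b, (L₁ ++ L₂).find? (fun q => q.2 == m) = some b := by
    rw [← Option.isSome_iff_exists, List.find?_isSome]
    simp only [List.mem_map] at hmem
    obtain ⟨q, hq, hq2⟩ := hmem
    exact ⟨q, hq, by simp [hq2]⟩
  obtain ⟨b, hb⟩ := hfind
  have hb2 : b.2 = m := by simpa using List.find?_some hb
  have hpa_old : pa (L₁ ++ L₂) = some b := by rw [pa, hm]; exact hb
  -- the new list's min m'
  have hmapN : (L₁ ++ (c, d) :: L₂).map (·.2) = L₁.map (·.2) ++ d :: L₂.map (·.2) := by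
    simp
  obtain ⟨m', hm', hmem', hle'⟩ := min?_int_spec' ((L₁ ++ (c, d) :: L₂).map (·.2)) (by simp)
  have hmemM : ∀ x ∈ (L₁ ++ L₂).map (·.2), x ∈ (L₁ ++ (c, d) :: L₂).map (·.2) := by
    intro x hx; rw [hmapN]; rw [List.map_append] at hx
    rcases List.mem_append.mp hx with h | h
    · exact List.mem_append.mpr (Or.inl h)
    · exact List.mem_append.mpr (Or.inr (List.mem_cons_of_mem _ h))
  have hm'le_d : m' ≤ d := hle' d (by rw [hmapN]; exact List.mem_append.mpr (Or.inr (by simp)))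
  have hm'le_m : m' ≤ m := hle' m (hmemM m hmem)
  have hm'cases : m' = d ∨ m ≤ m' := by
    rw [hmapN] at hmem'
    rcases List.mem_append.mp hmem' with h | h
    · right; exact hle m' (by rw [List.map_append]; exact List.mem_append.mpr (Or.inl h))
    · rcases List.mem_cons.mp h with h | h
      · left; exact h
      · right; exact hle m' (by rw [List.map_append]; exact List.mem_append.mpr (Or.inr h))
  rw [hpa_old, pa, hm']
  show (L₁ ++ (c, d) :: L₂).find? (fun q => q.2 == m') = if d < b.2 then some (c, d) else some b
  by_cases hdm : d < m
  · -- new candidate is the unique strict minimum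
    have hL2 : L₂ = [] := by
      rw [List.eq_nil_iff_forall_not_mem]
      intro q hq
      have h1 := h₂ q hq
      have h2' := hle q.2 (by rw [List.map_append]; exact List.mem_append.mpr (Or.inr (List.mem_map_of_mem hq)))
      omega
    subst hL2
    have hm'd : m' = d := by rcases hm'cases with h | h <;> omega
    subst hm'd
    have hf1 : L₁.find? (fun q => q.2 == m') = none := by
      rw [List.find?_eq_none]
      intro x hx
      have := hle x.2 (by rw [List.map_append]; exact List.mem_append.mpr (Or.inl (List.mem_map_of_mem hx)))
      simp only [beq_iff_eq]
      omega
    rw [List.find?_append, hf1]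
    simp [hb2, hdm]
  · -- old minimum survives; ties keep the earlier (first-occurrence) candidate
    have hm'm : m' = m := by rcases hm'cases with h | h <;> omega
    subst hm'm
    rw [List.find?_append] at hb ⊢
    cases hf1 : L₁.find? (fun q => q.2 == m') with
    | some b' =>
      rw [hf1] at hb
      rw [Option.some_or] at hb
      rw [Option.some.injEq] at hb
      subst hb
      simp [hb2, hdm]
    | none =>
      rw [hf1] at hb
      rw [Option.none_or] at hb ⊢
      have hbL2 : b ∈ L₂ := List.mem_of_find?_eq_some hb
      have hdne : ((d == m') = true) → False := by
        have := h₂ b hbL2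
        simp only [beq_iff_eq]
        omega
      rw [List.find?_cons]
      simp only [show (((c, d) : Char × Int).2 == m') = false from Bool.eq_false_iff.mpr hdne]
      rw [hb]
      simp [hb2, hdm]

def entA (p : List Char) (a : Char) : Int × Int :=
  match occs p a with
  | [] => (0, 0)
  | [i] => ((i : Int), 1)
  | i :: j :: _ => ((j : Int) - (i : Int), 2)

def gapOf (p : List Char) (a : Char) : Int :=
  match occs p a with
  | i :: j :: _ => (j : Int) - (i : Int)
  | _ => 0

def hd0 (p : List Char) (a : Char) : Nat := (occs p a).headD 0

lemma occs_append_ne (p : List Char) {c a : Char} (h : a ≠ c) : occs (p ++ [c]) a = occs p a := by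
  rw [occs_append, if_neg h, List.append_nil]

lemma occs_eq_nil (p : List Char) {c : Char} (hc : c ∉ p) : occs p c = [] := by
  have h1 := length_occs p c
  rw [List.count_eq_zero_of_not_mem hc] at h1
  exact List.eq_nil_of_length_eq_zero h1

lemma occs_one (p : List Char) {c : Char} (hc : p.count c = 1) : occs p c = [hd0 p c] := by
  have h1 := length_occs p c
  rw [hc] at h1
  obtain ⟨i, hi⟩ := List.length_eq_one_iff.mp h1
  rw [hi]; simp [hd0, hi]

lemma occs_two (p : List Char) {c : Char} (hc : 2 ≤ p.count c) :
    ∃ j t, occs p c = hd0 p c :: j :: t := by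
  have h1 := length_occs p c
  rcases ho : occs p c with _ | ⟨i, _ | ⟨j, t⟩⟩
  · rw [ho] at h1; simp at h1; omega
  · rw [ho] at h1; simp at h1; omega
  · exact ⟨j, t, by simp [hd0, ho]⟩

lemma hd0_append_ne (p : List Char) {c a : Char} (h : a ≠ c) : hd0 (p ++ [c]) a = hd0 p a := by
  rw [hd0, occs_append_ne p h]; rfl

lemma hd0_append_mem (p : List Char) {c : Char} (hc : c ∈ p) : hd0 (p ++ [c]) c = hd0 p c := by
  rw [hd0, hd0, occs_append, if_pos rfl]
  have hne := occs_ne_nil_of_mem p c hc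
  rcases ho : occs p c with _ | ⟨x, xs⟩
  · exact absurd ho hne
  · rfl

lemma hd0_append_fresh (p : List Char) {c : Char} (hc : c ∉ p) : hd0 (p ++ [c]) c = p.length := by
  rw [hd0, occs_append, if_pos rfl, occs_eq_nil p hc]; rfl

lemma hd0_lt_length (p : List Char) {a : Char} (h : a ∈ p) : hd0 p a < p.length := by
  have hne := occs_ne_nil_of_mem p a h
  apply mem_occs_lt p a
  rw [hd0]
  rcases ho : occs p a with _ | ⟨x, xs⟩
  · exact absurd ho hne
  · simp

lemma entA_append_ne (p : List Char) {c a : Char} (h : a ≠ c) : entA (p ++ [c]) a = entA p a := by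
  rw [entA, entA, occs_append_ne p h]

lemma gapOf_append_ne (p : List Char) {c a : Char} (h : a ≠ c) : gapOf (p ++ [c]) a = gapOf p a := by
  rw [gapOf, gapOf, occs_append_ne p h]

lemma entA_mem_one (p : List Char) {c : Char} (hc : p.count c = 1) :
    entA p c = ((hd0 p c : Int), 1) := by
  rw [entA, occs_one p hc]

lemma entA_mem_two (p : List Char) {c : Char} (hc : 2 ≤ p.count c) :
    (entA p c).2 = 2 := by
  obtain ⟨j, t, h⟩ := occs_two p hc
  rw [entA, h]

lemma count_append_singleton_self (p : List Char) (c : Char) :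
    (p ++ [c]).count c = p.count c + 1 := by
  simp [List.count_append]

lemma count_append_singleton_ne (p : List Char) {c a : Char} (h : a ≠ c) :
    (p ++ [c]).count a = p.count a := by
  rw [List.count_append, List.count_singleton, if_neg (by simpa using fun hh => h hh.symm)]
  omega

def modelA (p : List Char) : List (Char × (Int × Int)) :=
  (PySem.Set.ofList p).map (fun a => (a, entA p a))

def modelF (p : List Char) : List (Char × Int) :=
  ((PySem.Set.ofList p).filter (fun a => decide (2 ≤ p.count a))).map (fun a => (a, gapOf p a))

lemma get?_of_items {ν : Type} (d : PySem.Dict Char ν) (L : List (Char × ν)) (c : Char)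
    (h : d.items = L) : d.get? c = (L.find? (fun q => q.1 == c)).map (·.2) := by
  simp [PySem.Dict.get?, h]

lemma contains_of_items_model {ν : Type} (d : PySem.Dict Char ν) (p : List Char)
    (v : Char → ν) (c : Char) (h : d.items = (PySem.Set.ofList p).map (fun a => (a, v a))) :
    d.contains c = decide (c ∈ p) := by
  by_cases hc : c ∈ p
  · simp only [PySem.Dict.contains, h, hc, decide_true]
    rw [List.any_eq_true]
    have : (c, v c) ∈ (PySem.Set.ofList p).map (fun a => (a, v a)) :=
      List.mem_map_of_mem ((PySem.Set.mem_ofList p c).mpr hc)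
    exact ⟨(c, v c), this, by simp⟩
  · simp only [PySem.Dict.contains, h, hc, decide_false]
    rw [List.any_eq_false]
    rintro x hx
    obtain ⟨a, ha, rfl⟩ := List.mem_map.mp hx
    simp only [beq_iff_eq]
    intro hh
    exact hc (hh ▸ (PySem.Set.mem_ofList p a).mp ha)

lemma set_contains_add (s : PySem.Set Char) (x a : Char) :
    (s.add x).contains a = (s.contains a || a == x) := by
  by_cases hx : s.contains x
  · rw [PySem.Set.add, if_pos hx]
    by_cases hax : a = x
    · subst hax; simp [hx]
      rw [PySem.Set.contains, List.contains_iff_mem] at hx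
      exact hx
    · simp [hax]
  · rw [PySem.Set.add, if_neg (by simpa using hx)]
    simp only [PySem.Set.contains, List.contains_append]
    simp [List.contains_iff_mem, Bool.beq_eq_decide_eq]

lemma entA_append_two (p : List Char) {c : Char} (hc : 2 ≤ p.count c) :
    entA (p ++ [c]) c = entA p c := by
  obtain ⟨j, t, ho⟩ := occs_two p hc
  rw [entA, entA, occs_append, if_pos rfl, ho]
  rfl

lemma gapOf_append_two (p : List Char) {c : Char} (hc : 2 ≤ p.count c) :
    gapOf (p ++ [c]) c = gapOf p c := by
  obtain ⟨j, t, ho⟩ := occs_two p hc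
  rw [gapOf, gapOf, occs_append, if_pos rfl, ho]
  rfl

lemma entA_append_fresh (p : List Char) {c : Char} (hc : c ∉ p) :
    entA (p ++ [c]) c = ((p.length : Int), 1) := by
  rw [entA, occs_append, if_pos rfl, occs_eq_nil p hc]
  rfl

lemma entA_append_one (p : List Char) {c : Char} (hc : p.count c = 1) :
    entA (p ++ [c]) c = ((p.length : Int) - (hd0 p c : Int), 2) := by
  rw [entA, occs_append, if_pos rfl, occs_one p hc]
  rfl

lemma gapOf_append_one (p : List Char) {c : Char} (hc : p.count c = 1) :
    gapOf (p ++ [c]) c = (p.length : Int) - (hd0 p c : Int) := by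
  rw [gapOf, occs_append, if_pos rfl, occs_one p hc]
  rfl

lemma stepA_model (p : List Char) (c : Char) (d : PySem.Dict Char (Int × Int))
    (hd : d.items = modelA p) :
    (stepA d ((p.length : Int), c)).items = modelA (p ++ [c]) := by
  have hget := get?_of_items d (modelA p) c hd
  have hcont := contains_of_items_model d p _ c hd
  by_cases hc : c ∈ p
  · have hcS : c ∈ PySem.Set.ofList p := (PySem.Set.mem_ofList p c).mpr hc
    rw [modelA, find?_map_pair _ _ _ hcS] at hget
    simp only [Option.map_some] at hget
    by_cases h2 : 2 ≤ p.count c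
    · -- already counted twice: dict unchanged
      have hv2 := entA_mem_two p h2
      rw [stepA]
      rw [hget]
      simp only [hv2]
      norm_num
      rw [hd, modelA, modelA, ofList_append_mem p c hc]
      apply List.map_congr_left
      intro a ha
      by_cases hac : a = c
      · subst hac; rw [entA_append_two p h2]
      · rw [entA_append_ne p hac]
    · -- second occurrence: overwrite with (gap, 2)
      have h1 : p.count c = 1 := by
        have := List.count_pos_iff.mpr hc
        omega
      rw [stepA, hget, entA_mem_one p h1]
      norm_num
      rw [PySem.Dict.items_insert_of_contains d _ (by rw [hcont]; simp [hc]), hd, modelA, modelA,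
        ofList_append_mem p c hc, List.map_map]
      apply List.map_congr_left
      intro a ha
      by_cases hac : a = c
      · subst hac
        simp only [Function.comp, beq_self_eq_true, if_true]
        rw [entA_append_one p h1]
      · simp only [Function.comp, beq_iff_eq, hac, if_false]
        rw [entA_append_ne p hac]
  · -- first occurrence: append (i, 1)
    have hcS : c ∉ PySem.Set.ofList p := fun h => hc ((PySem.Set.mem_ofList p c).mp h)
    rw [modelA, find?_map_pair_none _ _ _ hcS] at hget
    simp only [Option.map_none] at hget
    rw [stepA, hget]
    rw [PySem.Dict.items_insert_of_not_contains d _ (by simp [hcont, hc]), hd, modelA, modelA,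
      ofList_append_not_mem p c hc, List.map_append]
    congr 1
    · apply List.map_congr_left
      intro a ha
      have hac : a ≠ c := fun h => hc (h ▸ (PySem.Set.mem_ofList p a).mp ha)
      rw [entA_append_ne p hac]
    · simp [entA_append_fresh p hc]

lemma modelF_append_fresh (p : List Char) {c : Char} (hc : c ∉ p) :
    modelF (p ++ [c]) = modelF p := by
  rw [modelF, modelF, ofList_append_not_mem p c hc, List.filter_append]
  have hPc : (decide (2 ≤ (p ++ [c]).count c)) = false := by
    rw [count_append_singleton_self, List.count_eq_zero_of_not_mem hc]
    simp
  have h1 : List.filter (fun a => decide (2 ≤ (p ++ [c]).count a)) [c] = [] := by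
    rw [List.filter_cons]
    simp only [hPc, Bool.false_eq_true, if_false, List.filter_nil]
  rw [h1, List.append_nil]
  rw [List.filter_congr (fun a ha => ?_)]
  · apply List.map_congr_left
    intro a ha
    have ha' := List.mem_filter.mp ha |>.1
    have hac : a ≠ c := fun h => hc (h ▸ (PySem.Set.mem_ofList p a).mp ha')
    rw [gapOf_append_ne p hac]
  · have hac : a ≠ c := fun h => hc (h ▸ (PySem.Set.mem_ofList p a).mp ha)
    rw [count_append_singleton_ne p hac]

lemma modelF_append_two (p : List Char) {c : Char} (hc : 2 ≤ p.count c) :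
    modelF (p ++ [c]) = modelF p := by
  have hcp : c ∈ p := List.count_pos_iff.mp (by omega)
  rw [modelF, modelF, ofList_append_mem p c hcp]
  rw [List.filter_congr (fun a ha => ?_)]
  · apply List.map_congr_left
    intro a ha
    by_cases hac : a = c
    · subst hac; rw [gapOf_append_two p hc]
    · rw [gapOf_append_ne p hac]
  · by_cases hac : a = c
    · subst hac
      rw [count_append_singleton_self]
      simp only [decide_eq_decide]
      omega
    · rw [count_append_singleton_ne p hac]

lemma modelF_append_one (p : List Char) {c : Char} (hc : p.count c = 1)
    (ihP : (PySem.Set.ofList p).Pairwise (fun x y => hd0 p x < hd0 p y)) :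
    ∃ L₁ L₂, modelF p = L₁ ++ L₂
      ∧ modelF (p ++ [c]) = L₁ ++ (c, (p.length : Int) - (hd0 p c : Int)) :: L₂
      ∧ ∀ q ∈ L₂, q.2 < (p.length : Int) - (hd0 p c : Int) := by
  have hcp : c ∈ p := List.count_pos_iff.mp (by omega)
  have hcS : c ∈ PySem.Set.ofList p := (PySem.Set.mem_ofList p c).mpr hcp
  obtain ⟨S₁, S₂, hS⟩ := List.append_of_mem hcS
  have hnd := PySem.Set.nodup_ofList p
  rw [hS] at hnd
  have hc1 : c ∉ S₁ := by
    rw [List.nodup_append] at hnd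
    exact fun h => hnd.2.2 c h c (by simp) rfl
  have hc2 : c ∉ S₂ := by
    rw [List.nodup_append] at hnd
    exact (List.nodup_cons.mp hnd.2.1).1
  have hP2 : ∀ a ∈ S₂, hd0 p c < hd0 p a := by
    rw [hS] at ihP
    have := (List.pairwise_append.mp ihP).2.1
    exact fun a ha => (List.pairwise_cons.mp this).1 a ha
  have hmem1 : ∀ a ∈ S₁, a ∈ p := by
    intro a ha
    exact (PySem.Set.mem_ofList p a).mp (hS ▸ List.mem_append.mpr (Or.inl ha))
  have hmem2 : ∀ a ∈ S₂, a ∈ p := by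
    intro a ha
    exact (PySem.Set.mem_ofList p a).mp (hS ▸ List.mem_append.mpr (Or.inr (List.mem_cons_of_mem _ ha)))
  refine ⟨(S₁.filter (fun a => decide (2 ≤ p.count a))).map (fun a => (a, gapOf p a)),
          (S₂.filter (fun a => decide (2 ≤ p.count a))).map (fun a => (a, gapOf p a)), ?_, ?_, ?_⟩
  · rw [modelF, hS, List.filter_append, List.filter_cons]
    have hPc' : decide (2 ≤ p.count c) = false := by rw [hc]; simp
    simp only [hPc', Bool.false_eq_true, if_false]
    rw [List.map_append]
  · rw [modelF, ofList_append_mem p c hcp, hS, List.filter_append, List.filter_cons]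
    have hPc : decide (2 ≤ (p ++ [c]).count c) = true := by
      rw [count_append_singleton_self, hc]; simp
    simp only [hPc, if_true]
    have hf1 : S₁.filter (fun a => decide (2 ≤ (p ++ [c]).count a))
        = S₁.filter (fun a => decide (2 ≤ p.count a)) := by
      apply List.filter_congr
      intro a ha
      rw [count_append_singleton_ne p (by intro h; subst h; exact hc1 ha)]
    have hf2 : S₂.filter (fun a => decide (2 ≤ (p ++ [c]).count a))
        = S₂.filter (fun a => decide (2 ≤ p.count a)) := by
      apply List.filter_congr
      intro a ha
      rw [count_append_singleton_ne p (by intro h; subst h; exact hc2 ha)]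
    rw [hf1, hf2, List.map_append, List.map_cons]
    congr 1
    · apply List.map_congr_left
      intro a ha
      rw [gapOf_append_ne p (by intro h; subst h; exact hc1 (List.mem_filter.mp ha).1)]
    · congr 1
      · rw [gapOf_append_one p hc]
      · apply List.map_congr_left
        intro a ha
        rw [gapOf_append_ne p (by intro h; subst h; exact hc2 (List.mem_filter.mp ha).1)]
  · rintro q hq
    obtain ⟨a, ha, rfl⟩ := List.mem_map.mp hq
    obtain ⟨ha2, hcnt⟩ := List.mem_filter.mp ha
    simp only [decide_eq_true_eq] at hcnt
    obtain ⟨j, t, ho⟩ := occs_two p hcnt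
    have hj : j < p.length := mem_occs_lt p a (by rw [ho]; simp)
    have hlt := hP2 a ha2
    have : gapOf p a = (j : Int) - (hd0 p a : Int) := by rw [gapOf, ho]
    rw [this]
    push_cast
    omega

lemma stepB_inv (p : List Char) (c : Char)
    (st : PySem.Dict Char Int × PySem.Set Char × Option (Char × Int))
    (ihF : ∀ a, st.1.get? a = if a ∈ p then some ((hd0 p a : Int)) else none)
    (ihC : ∀ a, st.2.1.contains a = decide (2 ≤ p.count a))
    (ihB : st.2.2 = pa (modelF p))
    (ihP : (PySem.Set.ofList p).Pairwise (fun x y => hd0 p x < hd0 p y)) :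
    (∀ a, (stepB st ((p.length : Int), c)).1.get? a
        = if a ∈ p ++ [c] then some ((hd0 (p ++ [c]) a : Int)) else none)
    ∧ (∀ a, (stepB st ((p.length : Int), c)).2.1.contains a = decide (2 ≤ (p ++ [c]).count a))
    ∧ (stepB st ((p.length : Int), c)).2.2 = pa (modelF (p ++ [c])) := by
  by_cases hc : c ∈ p
  · have hget : st.1.get? c = some ((hd0 p c : Int)) := by rw [ihF c, if_pos hc]
    by_cases h2 : 2 ≤ p.count c
    · -- already counted: no change at all
      have hstep : stepB st ((p.length : Int), c) = st := by
        rw [stepB, hget]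
        simp only [ihC c, h2, decide_true, if_true]
      rw [hstep]
      refine ⟨?_, ?_, ?_⟩
      · intro a
        rw [ihF a]
        by_cases hac : a = c
        · subst hac
          rw [if_pos hc, if_pos (List.mem_append.mpr (Or.inl hc)), hd0_append_mem p hc]
        · rw [hd0_append_ne p hac]
          by_cases hap : a ∈ p
          · rw [if_pos hap, if_pos (List.mem_append.mpr (Or.inl hap))]
          · rw [if_neg hap, if_neg (by simp [hap, hac])]
      · intro a
        rw [ihC a]
        by_cases hac : a = c
        · subst hac
          rw [count_append_singleton_self]
          simp only [decide_eq_decide]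
          omega
        · rw [count_append_singleton_ne p hac]
      · rw [ihB, modelF_append_two p h2]
    · -- second occurrence: record the gap and update the running minimum
      have h1 : p.count c = 1 := by
        have := List.count_pos_iff.mpr hc
        omega
      have hnc : st.2.1.contains c = false := by rw [ihC c, h1]; simp
      have hstep : stepB st ((p.length : Int), c)
          = (st.1, st.2.1.add c,
              match st.2.2 with
              | none => some (c, (p.length : Int) - (hd0 p c : Int))
              | some bm => if (p.length : Int) - (hd0 p c : Int) < bm.2
                  then some (c, (p.length : Int) - (hd0 p c : Int)) else some bm) := by
        rw [stepB, hget]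
        simp only [hnc, Bool.false_eq_true, if_false]
      rw [hstep]
      obtain ⟨L₁, L₂, hold, hnew, hlt⟩ := modelF_append_one p h1 ihP
      refine ⟨?_, ?_, ?_⟩
      · intro a
        rw [ihF a]
        by_cases hac : a = c
        · subst hac
          rw [if_pos hc, if_pos (List.mem_append.mpr (Or.inl hc)), hd0_append_mem p hc]
        · rw [hd0_append_ne p hac]
          by_cases hap : a ∈ p
          · rw [if_pos hap, if_pos (List.mem_append.mpr (Or.inl hap))]
          · rw [if_neg hap, if_neg (by simp [hap, hac])]
      · intro a
        show (st.2.1.add c).contains a = _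
        rw [set_contains_add, ihC a]
        by_cases hac : a = c
        · subst hac
          rw [count_append_singleton_self, h1]
          simp
        · rw [count_append_singleton_ne p hac]
          simp [hac]
      · show (match st.2.2 with
              | none => some (c, (p.length : Int) - (hd0 p c : Int))
              | some bm => if (p.length : Int) - (hd0 p c : Int) < bm.2
                  then some (c, (p.length : Int) - (hd0 p c : Int)) else some bm)
            = pa (modelF (p ++ [c]))
        rw [ihB, hold, hnew, pa_insert L₁ L₂ c _ hlt]
  · -- first occurrence: remember the index
    have hget : st.1.get? c = none := by rw [ihF c, if_neg hc]
    have hstep : stepB st ((p.length : Int), c)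
        = (st.1.insert c (p.length : Int), st.2.1, st.2.2) := by
      rw [stepB, hget]
    rw [hstep]
    refine ⟨?_, ?_, ?_⟩
    · intro a
      show (st.1.insert c (p.length : Int)).get? a = _
      rw [PySem.Dict.get?_insert]
      by_cases hac : a = c
      · subst hac
        rw [if_pos rfl, if_pos (by simp), hd0_append_fresh p hc]
      · rw [if_neg hac, ihF a, hd0_append_ne p hac]
        by_cases hap : a ∈ p
        · rw [if_pos hap, if_pos (List.mem_append.mpr (Or.inl hap))]
        · rw [if_neg hap, if_neg (by simp [hap, hac])]
    · intro a
      rw [ihC a]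
      by_cases hac : a = c
      · subst hac
        rw [count_append_singleton_self, List.count_eq_zero_of_not_mem hc]
        simp
      · rw [count_append_singleton_ne p hac]
    · rw [ihB, modelF_append_fresh p hc]

lemma hd0_append_of_mem (p : List Char) {c a : Char} (ha : a ∈ p) :
    hd0 (p ++ [c]) a = hd0 p a := by
  by_cases hac : a = c
  · subst hac; exact hd0_append_mem p ha
  · exact hd0_append_ne p hac

lemma pairwise_hd0_append (p : List Char) (c : Char)
    (ihP : (PySem.Set.ofList p).Pairwise (fun x y => hd0 p x < hd0 p y)) :
    (PySem.Set.ofList (p ++ [c])).Pairwise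
      (fun x y => hd0 (p ++ [c]) x < hd0 (p ++ [c]) y) := by
  by_cases hc : c ∈ p
  · rw [ofList_append_mem p c hc]
    refine ihP.imp_of_mem (fun {a b} ha hb h => ?_)
    rw [hd0_append_of_mem p ((PySem.Set.mem_ofList p a).mp ha),
      hd0_append_of_mem p ((PySem.Set.mem_ofList p b).mp hb)]
    exact h
  · rw [ofList_append_not_mem p c hc]
    rw [List.pairwise_append]
    refine ⟨ihP.imp_of_mem (fun {a b} ha hb h => ?_), by simp, ?_⟩
    · rw [hd0_append_of_mem p ((PySem.Set.mem_ofList p a).mp ha),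
        hd0_append_of_mem p ((PySem.Set.mem_ofList p b).mp hb)]
      exact h
    · intro a ha b hb
      rw [List.mem_singleton] at hb
      subst hb
      have hap := (PySem.Set.mem_ofList p a).mp ha
      rw [hd0_append_of_mem p hap, hd0_append_fresh p hc]
      exact hd0_lt_length p hap

lemma main_inv (p : List Char) :
    ((PySem.List.enumerate p 0).foldl stepA (PySem.Dict.mk [])).items = modelA p
  ∧ (∀ a, ((PySem.List.enumerate p 0).foldl stepB
        ((PySem.Dict.mk [] : PySem.Dict Char Int), PySem.Set.empty, none)).1.get? a
        = if a ∈ p then some ((hd0 p a : Nat) : Int) else none)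
  ∧ (∀ a, ((PySem.List.enumerate p 0).foldl stepB
        ((PySem.Dict.mk [] : PySem.Dict Char Int), PySem.Set.empty, none)).2.1.contains a
        = decide (2 ≤ p.count a))
  ∧ ((PySem.List.enumerate p 0).foldl stepB
        ((PySem.Dict.mk [] : PySem.Dict Char Int), PySem.Set.empty, none)).2.2 = pa (modelF p)
  ∧ (PySem.Set.ofList p).Pairwise (fun x y => hd0 p x < hd0 p y) := by
  induction p using List.reverseRecOn with
  | nil =>
    refine ⟨rfl, ?_, ?_, rfl, by simp [PySem.Set.ofList]⟩
    · intro a; simp [PySem.Dict.get?]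
    · intro a; simp [PySem.Set.contains, PySem.Set.empty]
  | append_singleton p c ih =>
    obtain ⟨ihA, ihF, ihC, ihB, ihP⟩ := ih
    have henum : PySem.List.enumerate (p ++ [c]) 0
        = PySem.List.enumerate p 0 ++ [((p.length : Int), c)] := by
      rw [PySem.List.enumerate_append]
      simp [PySem.List.enumerate]
    rw [henum, List.foldl_append, List.foldl_append]
    simp only [List.foldl_cons, List.foldl_nil]
    obtain ⟨hF, hC, hB⟩ := stepB_inv p c _ ihF ihC ihB ihP
    exact ⟨stepA_model p c _ ihA, hF, hC, hB, pairwise_hd0_append p c ihP⟩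

lemma entA_snd (p : List Char) (a : Char) :
    ((entA p a).2 == 2) = decide (2 ≤ p.count a) := by
  rw [← length_occs]
  rw [entA]
  rcases occs p a with _ | ⟨i, _ | ⟨j, t⟩⟩ <;> simp

lemma filter_modelA (p : List Char) :
    ((modelA p).filter (fun q => q.2.2 == 2)).map (fun q => (q.1, q.2.1)) = modelF p := by
  rw [modelA, modelF, List.filter_map, List.map_map]
  rw [List.filter_congr (fun a _ => by simpa using entA_snd p a)]
  apply List.map_congr_left
  intro a ha
  have hcnt := (List.mem_filter.mp ha).2
  simp only [decide_eq_true_eq] at hcnt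
  obtain ⟨j, t, ho⟩ := occs_two p hcnt
  simp only [Function.comp]
  rw [entA, gapOf, ho]

-- ===== VERDICT (by name: the statement is the Claim_ definition above) =====
theorem repeatedCharacter_spec : Claim_equal_repeatedCharacter := by
  intro s _
  show repeatedCharacter s = repeatedCharacter_alt s
  obtain ⟨hA, _, _, hB, _⟩ := main_inv s.toList
  simp only [repeatedCharacter, repeatedCharacter_alt, hA, hB, PySem.Dict.values,
    filter_modelA]
  cases hmin : PySem.List.min? ((modelF s.toList).map (·.2)) (fun v => v) with
  | none => simp [pa, hmin]
  | some m => simp [pa, hmin]
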